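-- pv_equiv track=rewrite | github.com/RenanLira/ifpi-ads-algoritmos2020 | Vetores e Matrizes (Python Lists)/listas_q017_maior_e_menor_linha.py | menor_linha
-- ===== SOURCE A (Python) =====
-- from functools import reduce
--
-- def menor_linha(matriz):
--     tam_row = 0
--     lista_tam = []
--     for i in range(len(matriz)):
--         tam_row = reduce(lambda a, b: a+b, matriz[i])
--         lista_tam.append(tam_row)
--
--     menor_tam = reduce(lambda a, b: a if a < b else b, lista_tam)
--     posicao = lista_tam.index(menor_tam)+1
--
--     return posicao
-- ===== SOURCE B (Python) =====
-- def menor_linha(matriz):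
--     posicao = 0
--     menor = None
--     for i, linha in enumerate(matriz, 1):
--         s = sum(linha)
--         if menor is None or s < menor:
--             menor = s
--             posicao = i
--     return posicao
-- ===== Notes on version B (the rewrite author's own statement) =====
-- stated objective: faster
-- what changed: B replaces A's three passes (build the list of row sums with reduce, reduce-min over that list, then .index to rescan it) by one enumerate loop that keeps only the best sum and its 1-based position, never materialising the list of sums.
import Mathlib
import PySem

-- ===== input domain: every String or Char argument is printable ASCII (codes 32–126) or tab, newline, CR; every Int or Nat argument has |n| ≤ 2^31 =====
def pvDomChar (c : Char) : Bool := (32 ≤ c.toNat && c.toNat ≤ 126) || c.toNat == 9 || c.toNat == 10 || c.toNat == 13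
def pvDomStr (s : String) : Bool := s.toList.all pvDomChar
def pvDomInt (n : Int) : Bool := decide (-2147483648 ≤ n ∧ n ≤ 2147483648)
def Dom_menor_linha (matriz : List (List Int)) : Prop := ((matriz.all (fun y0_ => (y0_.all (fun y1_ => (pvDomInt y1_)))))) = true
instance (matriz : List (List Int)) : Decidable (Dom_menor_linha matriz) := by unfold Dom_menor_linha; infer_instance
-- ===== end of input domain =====

-- B is one enumerate pass keeping the best sum and its 1-based position; A builds the
-- list of row sums, reduce-mins it, then rescans it with .index. Equivalence on the
-- return value; neither mutates its argument.

-- ===== PORT A =====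
-- reduce(lambda a, b: a+b, l); the empty case raises TypeError in Python (excluded by Pre_)
def pyReduceAdd (l : List Int) : Int :=
  match l with
  | [] => 0
  | h :: t => t.foldl (fun a b => a + b) h

-- reduce(lambda a, b: a if a < b else b, l); empty case raises TypeError (excluded by Pre_)
def pyReduceMin (l : List Int) : Int :=
  match l with
  | [] => 0
  | h :: t => t.foldl (fun a b => if a < b then a else b) h

def menor_linha (matriz : List (List Int)) : Int :=
  let lista_tam := (PySem.List.pyRange 0 matriz.length 1).foldl
    (fun acc i => acc ++ [pyReduceAdd ((PySem.List.pyGet? matriz i).getD [])]) []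
  let menor_tam := pyReduceMin lista_tam
  -- .index raises ValueError if absent; here menor_tam is always a member
  let posicao : Int := ((PySem.List.index? lista_tam menor_tam).getD 0 : Nat) + 1
  posicao

-- ===== PORT B =====
def altGo (rows : List (List Int)) (i : Int) (menor : Option Int) (posicao : Int) : Int :=
  match rows with
  | [] => posicao
  | linha :: rest =>
    let s := linha.foldl (fun a b => a + b) 0
    match menor with
    | none => altGo rest (i + 1) (some s) i
    | some m =>
      if s < m then altGo rest (i + 1) (some s) i
      else altGo rest (i + 1) (some m) posicao

def menor_linha_alt (matriz : List (List Int)) : Int := altGo matriz 1 none 0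

-- ===== PRECONDITION & SPEC =====
-- Pre_ excludes the empty matrix and matrices containing an empty row: there A's
-- reduce() raises TypeError (no value is returned).
def Pre_menor_linha (matriz : List (List Int)) : Prop :=
  matriz ≠ [] ∧ ∀ linha ∈ matriz, linha ≠ []
instance (matriz : List (List Int)) : Decidable (Pre_menor_linha matriz) := by
  unfold Pre_menor_linha; infer_instance
def pvWitness_menor_linha : List (List Int) := [[3, 1], [2], [0, 5]]

def Spec_menor_linha (matriz : List (List Int)) (out : Int) : Prop := out = menor_linha_alt matriz
instance (matriz : List (List Int)) (out : Int) : Decidable (Spec_menor_linha matriz out) := by unfold Spec_menor_linha; infer_instance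

-- ===== CLAIM (what is proved, stated in full; the proofs are below) =====
def Claim_equal_menor_linha : Prop := ∀ (matriz : List (List Int)), Dom_menor_linha matriz → Pre_menor_linha matriz → Spec_menor_linha matriz (menor_linha matriz)

-- ===== LEMMAS AND PROOFS =====

-- running minimum of A's second reduce, seeded with m
def minf (m : Int) (l : List Int) : Int :=
  l.foldl (fun a b => if a < b then a else b) m

-- sum of a row as B computes it
def sum0 (l : List Int) : Int := l.foldl (fun a b => a + b) 0

theorem minf_cons (m x : Int) (xs : List Int) :
    minf m (x :: xs) = minf (if m < x then m else x) xs := rfl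

theorem minf_le (l : List Int) : ∀ m : Int, minf m l ≤ m := by
  induction l with
  | nil => intro m; simp [minf]
  | cons x xs ih =>
    intro m
    rw [minf_cons]
    have := ih (if m < x then m else x)
    split_ifs at * <;> omega

theorem minf_mem (l : List Int) : ∀ m : Int, minf m l = m ∨ minf m l ∈ l := by
  induction l with
  | nil => intro m; simp [minf]
  | cons x xs ih =>
    intro m
    rw [minf_cons]
    rcases ih (if m < x then m else x) with h | h
    · rw [h]; split_ifs with hx
      · exact Or.inl rfl
      · exact Or.inr (by simp)
    · right; right; exact h

-- the single pass over the remaining rows, given a current best (m) reached at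
-- 1-based position pos with i = next position, equals "first index of the overall
-- minimum" arithmetic on the remaining sums
theorem altGo_eq (rows : List (List Int)) :
    ∀ (m i pos : Int),
      altGo rows i (some m) pos =
        if minf m (rows.map sum0) < m then
          i + ((PySem.List.index? (rows.map sum0) (minf m (rows.map sum0))).getD 0 : Nat)
        else pos := by
  induction rows with
  | nil => intro m i pos; simp [altGo, minf]
  | cons r rs ih =>
    intro m i pos
    have hstep : altGo (r :: rs) i (some m) pos =
        if sum0 r < m then altGo rs (i + 1) (some (sum0 r)) i
        else altGo rs (i + 1) (some m) pos := rfl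
    rw [hstep]
    have hmap : (r :: rs).map sum0 = sum0 r :: rs.map sum0 := rfl
    rw [hmap, minf_cons]
    by_cases hs : sum0 r < m
    · -- new best: running min seed becomes sum0 r
      have hseed : (if m < sum0 r then m else sum0 r) = sum0 r := by split <;> omega
      rw [if_pos hs, hseed, ih]
      have hle := minf_le (rs.map sum0) (sum0 r)
      set v := minf (sum0 r) (rs.map sum0) with hv
      by_cases hlt : v < sum0 r
      · -- strictly improved later: v ≠ sum0 r and v ∈ rs.map sum0
        have hne : sum0 r ≠ v := by omega
        have hmem : v ∈ rs.map sum0 := by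
          rcases minf_mem (rs.map sum0) (sum0 r) with h | h
          · omega
          · exact h
        have hv2 : v < m := by omega
        rw [if_pos hlt, if_pos hv2]
        rw [PySem.List.index?_cons_of_ne _ hne]
        rcases Option.isSome_iff_exists.mp
          ((PySem.List.index?_isSome_iff _ _).mpr hmem) with ⟨j, hj⟩
        rw [hj]
        simp [Option.map_some]
        ring
      · -- minimum of the rest is sum0 r itself: index 0
        have hvv : v = sum0 r := by omega
        rw [if_neg hlt, if_pos (by omega : v < m), hvv,
          PySem.List.index?_cons_self]
        simp
    · -- best unchanged
      have hseed : (if m < sum0 r then m else sum0 r) = m := by split <;> omega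
      rw [if_neg hs, hseed, ih]
      have hle := minf_le (rs.map sum0) m
      set v := minf m (rs.map sum0) with hv
      by_cases hlt : v < m
      · have hne : sum0 r ≠ v := by omega
        have hmem : v ∈ rs.map sum0 := by
          rcases minf_mem (rs.map sum0) m with h | h
          · omega
          · exact h
        rw [if_pos hlt, if_pos hlt]
        rw [PySem.List.index?_cons_of_ne _ hne]
        rcases Option.isSome_iff_exists.mp
          ((PySem.List.index?_isSome_iff _ _).mpr hmem) with ⟨j, hj⟩
        rw [hj]
        simp [Option.map_some]
        ring
      · rw [if_neg hlt, if_neg hlt]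

-- A's row-sum list is the map of its reduce over the matrix
theorem listaTam_eq (matriz : List (List Int)) :
    ((PySem.List.pyRange 0 matriz.length 1).foldl
      (fun acc i => acc ++ [pyReduceAdd ((PySem.List.pyGet? matriz i).getD [])]) [])
    = matriz.map pyReduceAdd := by
  rw [PySem.List.foldl_append_singleton_eq_map, PySem.List.pyRange_one]
  simp only [List.map_map, List.nil_append]
  apply List.ext_getElem
  · simp
  · intro k hk hk'
    have hk2 : k < matriz.length := by simpa using hk'
    simp [PySem.List.pyGet?_natCast, List.getElem?_eq_getElem hk2]

-- on a nonempty row, A's reduce equals B's sum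
theorem pyReduceAdd_eq_sum0 (l : List Int) (h : l ≠ []) : pyReduceAdd l = sum0 l := by
  cases l with
  | nil => exact absurd rfl h
  | cons x xs => simp [pyReduceAdd, sum0, List.foldl]

theorem menor_linha_eq_alt (matriz : List (List Int)) (h : Pre_menor_linha matriz) :
    menor_linha matriz = menor_linha_alt matriz := by
  obtain ⟨hne, hrows⟩ := h
  cases matriz with
  | nil => exact absurd rfl hne
  | cons r rs =>
    show (((PySem.List.index? _ (pyReduceMin _)).getD 0 : Nat) : Int) + 1 = _
    rw [listaTam_eq]
    have hmap : (r :: rs).map pyReduceAdd = (r :: rs).map sum0 :=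
      List.map_congr_left fun x hx => pyReduceAdd_eq_sum0 x (hrows x hx)
    rw [hmap]
    have hmin : pyReduceMin ((r :: rs).map sum0) = minf (sum0 r) (rs.map sum0) := rfl
    rw [hmin]
    show _ = altGo rs 2 (some (sum0 r)) 1
    rw [altGo_eq]
    have hle := minf_le (rs.map sum0) (sum0 r)
    set v := minf (sum0 r) (rs.map sum0) with hv
    by_cases hlt : v < sum0 r
    · have hne' : sum0 r ≠ v := by omega
      have hmem : v ∈ rs.map sum0 := by
        rcases minf_mem (rs.map sum0) (sum0 r) with h | h
        · omega
        · exact h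
      have hcons : (r :: rs).map sum0 = sum0 r :: rs.map sum0 := rfl
      rw [hcons, if_pos hlt, PySem.List.index?_cons_of_ne _ hne']
      rcases Option.isSome_iff_exists.mp
        ((PySem.List.index?_isSome_iff _ _).mpr hmem) with ⟨j, hj⟩
      rw [hj]
      simp [Option.map_some]
      ring
    · have hvv : v = sum0 r := by omega
      have hcons : (r :: rs).map sum0 = sum0 r :: rs.map sum0 := rfl
      rw [hcons, if_neg hlt, hvv, PySem.List.index?_cons_self]
      simp

-- ===== VERDICT (by name: the statement is the Claim_ definition above) =====
theorem menor_linha_spec : Claim_equal_menor_linha := by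
  intro matriz _ hpre
  exact menor_linha_eq_alt matriz hpre
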